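-- pv_equiv track=rewrite | github.com/jinyoung5497/Coding_Test | 백준/Silver/2644. 촌수계산/촌수계산.py | dfs
-- ===== SOURCE A (Python) =====
-- def dfs(x, y, relationship, visited, count):
--     visited[x] = True
--     for i in relationship[x]:
--         if not visited[i]:
--             if i == y:
--                 return count + 1
--             result = dfs(i, y, relationship, visited, count + 1)
--             if result != -1:
--                 return result
--     return -1
-- ===== SOURCE B (Python) =====
-- def dfs(x, y, relationship, visited, count):
--     visited[x] = True
--     stack = [(x, iter(relationship[x]), count)]
--     while stack:
--         node, it, depth = stack[-1]
--         i = next(it, None)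
--         if i is None:
--             stack.pop()
--             continue
--         if not visited[i]:
--             if i == y:
--                 return depth + 1
--             visited[i] = True
--             stack.append((i, iter(relationship[i]), depth + 1))
--     return -1
-- ===== Notes on version B (the rewrite author's own statement) =====
-- stated objective: alternative
-- what changed: The recursive first-path DFS is replaced by an iterative DFS over an explicit stack of (node, neighbor-iterator, depth) frames with the same visited-marking discipline, eliminating Python call-stack recursion.
-- outside the precondition, e.g. on dfs(0, 1, [[], [5]], [False, False], 0): A returns -1, B returns -1; on dfs(0, 2, [[1, 2], [2], []], [False, False, False], -3): A returns -2, B returns -1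
import Mathlib
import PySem

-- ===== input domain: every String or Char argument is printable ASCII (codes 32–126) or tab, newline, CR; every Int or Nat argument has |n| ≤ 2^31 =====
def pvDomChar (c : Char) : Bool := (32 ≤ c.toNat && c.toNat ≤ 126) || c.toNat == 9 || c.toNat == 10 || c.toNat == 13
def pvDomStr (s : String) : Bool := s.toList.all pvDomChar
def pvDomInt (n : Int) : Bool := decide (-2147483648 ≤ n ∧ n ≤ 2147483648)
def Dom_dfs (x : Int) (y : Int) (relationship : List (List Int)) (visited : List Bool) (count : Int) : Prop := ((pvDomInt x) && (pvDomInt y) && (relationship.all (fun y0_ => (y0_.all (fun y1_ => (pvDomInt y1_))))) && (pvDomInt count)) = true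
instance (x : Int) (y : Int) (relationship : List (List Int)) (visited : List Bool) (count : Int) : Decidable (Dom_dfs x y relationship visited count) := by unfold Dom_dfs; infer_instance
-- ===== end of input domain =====

-- B replaces A's recursive first-path DFS by an iterative DFS over an explicit stack of
-- (node, remaining-neighbors, depth) frames, with the same visit order and the same marking
-- discipline; the claim is about the RETURN value (in Python both perform the identical
-- in-place marking of `visited`).

-- number of False entries of `visited` (fuel bound / termination measure for the ports)
def falseCount (v : List Bool) : Nat := v.countP (fun b => !b)

-- marking a position that currently holds `false` strictly decreases `falseCount`
-- (cited by `stepB`'s termination proof, hence placed above the ports)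
theorem countP_set_true_lt : ∀ (l : List Bool) (k : Nat), l[k]? = some false →
    (l.set k true).countP (fun b => !b) < l.countP (fun b => !b) := by
  intro l
  induction l with
  | nil => intro k h; simp at h
  | cons a t ih =>
    intro k h
    cases k with
    | zero =>
      simp at h; subst h
      simp
    | succ k =>
      simp at h
      have := ih k h
      simp [List.countP_cons]
      omega

theorem falseCount_pySet?_lt (vis vis' : List Bool) (i : Int)
    (hg : PySem.List.pyGet? vis i = some false)
    (hs : PySem.List.pySet? vis i true = some vis') :
    falseCount vis' < falseCount vis := by
  cases h : PySem.List.pyIdx? vis.length i with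
  | none => simp [PySem.List.pyGet?, h] at hg
  | some k =>
    simp [PySem.List.pyGet?, h] at hg
    simp [PySem.List.pySet?, h] at hs
    subst hs
    exact countP_set_true_lt vis k hg

-- ===== PORT A =====
-- literal port of A; the recursion carries `visited` explicitly (Python mutates it in place)
-- and a fuel argument makes it total: `none` = fuel exhausted or an out-of-range index
-- (Python IndexError); both are excluded by Pre_.
mutual
def dfsA : Nat → Int → Int → List (List Int) → List Bool → Int → Option (Int × List Bool)
  | 0, _, _, _, _, _ => none
  | fuel+1, x, y, rel, vis, count =>
    match PySem.List.pySet? vis x true with              -- visited[x] = True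
    | none => none
    | some vis1 =>
      match PySem.List.pyGet? rel x with                 -- relationship[x]
      | none => none
      | some row => loopA fuel row y rel vis1 count
termination_by fuel => (fuel, 0, 0)

-- the `for i in relationship[x]` loop of A
def loopA : Nat → List Int → Int → List (List Int) → List Bool → Int → Option (Int × List Bool)
  | _, [], _, _, vis, _ => some (-1, vis)
  | fuel, i :: rest, y, rel, vis, count =>
    match PySem.List.pyGet? vis i with                   -- visited[i]
    | none => none
    | some true => loopA fuel rest y rel vis count
    | some false =>
      if i = y then some (count + 1, vis)
      else
        match dfsA fuel i y rel vis (count + 1) with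
        | none => none
        | some (r, vis') =>
          if r ≠ -1 then some (r, vis') else loopA fuel rest y rel vis' count
termination_by fuel row => (fuel, 1, row.length)
end

def dfs (x : Int) (y : Int) (relationship : List (List Int)) (visited : List Bool) (count : Int) : Int :=
  match dfsA (visited.length + 2) x y relationship visited count with
  | some (r, _) => r
  | none => -2      -- unreachable under Pre_ (the fuel exceeds the recursion depth there)

-- ===== PORT B =====
-- weight of the stack: pending neighbors plus frame count (termination measure only)
def stackW (s : List (Int × List Int × Int)) : Nat := (s.map (fun f => f.2.1.length)).sum + s.length

-- the `while stack:` loop of B; a frame (node, it, depth) holds the not-yet-consumed part of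
-- the frame's neighbor iterator; `none` = out-of-range index (Python IndexError), excluded by Pre_.
def stepB (stack : List (Int × List Int × Int)) (y : Int) (rel : List (List Int)) (vis : List Bool) : Option Int :=
  match stack with
  | [] => some (-1)
  | (node, it, depth) :: s =>
    match it with
    | [] => stepB s y rel vis                            -- iterator exhausted: stack.pop()
    | i :: it' =>
      match hg : PySem.List.pyGet? vis i with            -- visited[i]
      | none => none
      | some true => stepB ((node, it', depth) :: s) y rel vis
      | some false =>
        if i = y then some (depth + 1)
        else
          match hs : PySem.List.pySet? vis i true, PySem.List.pyGet? rel i with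
          | some vis2, some row => stepB ((i, row, depth + 1) :: (node, it', depth) :: s) y rel vis2
          | _, _ => none
termination_by (falseCount vis, stackW stack)
decreasing_by
  · apply Prod.Lex.right; simp [stackW]
  · apply Prod.Lex.right; simp [stackW]
  · apply Prod.Lex.left; exact falseCount_pySet?_lt vis vis2 i hg hs

def dfs_alt (x : Int) (y : Int) (relationship : List (List Int)) (visited : List Bool) (count : Int) : Int :=
  match PySem.List.pySet? visited x true with            -- visited[x] = True
  | none => -2
  | some vis1 =>
    match PySem.List.pyGet? relationship x with          -- iter(relationship[x])
    | none => -2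
    | some row => (stepB [(x, row, count)] y relationship vis1).getD (-2)

-- ===== PRECONDITION & SPEC =====
-- Pre_ restricts to the natural domain of the task: a well-formed adjacency structure
-- (relationship as long as visited; x and every adjacency entry an in-range Python index,
-- including negative ones, even if never reached — reachability is not closed-form) so that
-- A never raises IndexError, and count ≥ -1, because for count ≤ -2 a relative found at
-- depth d with count + d = -1 collides with A's -1 "not found" sentinel and A accidentally
-- discards that already-found path and keeps searching.
def Pre_dfs (x : Int) (y : Int) (relationship : List (List Int)) (visited : List Bool) (count : Int) : Prop :=
  relationship.length = visited.length ∧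
  (-(visited.length : Int) ≤ x ∧ x < (visited.length : Int)) ∧
  (∀ row ∈ relationship, ∀ e ∈ row, -(visited.length : Int) ≤ e ∧ e < (visited.length : Int)) ∧
  -1 ≤ count
instance (x : Int) (y : Int) (relationship : List (List Int)) (visited : List Bool) (count : Int) : Decidable (Pre_dfs x y relationship visited count) := by unfold Pre_dfs; infer_instance

def pvWitness_dfs : Int × Int × List (List Int) × List Bool × Int := (0, 1, [[1], [0]], [false, false], 0)

def Spec_dfs (x : Int) (y : Int) (relationship : List (List Int)) (visited : List Bool) (count : Int) (out : Int) : Prop := out = dfs_alt x y relationship visited count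
instance (x : Int) (y : Int) (relationship : List (List Int)) (visited : List Bool) (count : Int) (out : Int) : Decidable (Spec_dfs x y relationship visited count out) := by unfold Spec_dfs; infer_instance

-- ===== CLAIM (what is proved, stated in full; the proofs are below) =====
def Claim_equal_dfs : Prop := ∀ (x : Int) (y : Int) (relationship : List (List Int)) (visited : List Bool) (count : Int), Dom_dfs x y relationship visited count → Pre_dfs x y relationship visited count → Spec_dfs x y relationship visited count (dfs x y relationship visited count)

-- ===== LEMMAS AND PROOFS =====

theorem pyGet?_some_of_range {α : Type} (xs : List α) (i : Int)
    (h1 : -(xs.length : Int) ≤ i) (h2 : i < (xs.length : Int)) :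
    ∃ v, PySem.List.pyGet? xs i = some v ∧ v ∈ xs := by
  cases hv : PySem.List.pyGet? xs i with
  | none =>
    rw [PySem.List.pyGet?_eq_none_iff] at hv
    exact absurd ⟨h1, h2⟩ hv
  | some v => exact ⟨v, rfl, PySem.List.mem_of_pyGet?_eq_some xs hv⟩

theorem countP_set_true_le : ∀ (l : List Bool) (k : Nat),
    (l.set k true).countP (fun b => !b) ≤ l.countP (fun b => !b) := by
  intro l
  induction l with
  | nil => intro k; simp
  | cons a t ih =>
    intro k
    cases k with
    | zero => simp [List.countP_cons]
    | succ k => have := ih k; simp [List.countP_cons]; omega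

theorem pySet?_some_of_range (xs : List Bool) (i : Int)
    (h1 : -(xs.length : Int) ≤ i) (h2 : i < (xs.length : Int)) :
    ∃ ys, PySem.List.pySet? xs i true = some ys ∧ ys.length = xs.length ∧
      falseCount ys ≤ falseCount xs := by
  cases h : PySem.List.pyIdx? xs.length i with
  | none =>
    have : PySem.List.pySet? xs i true = none := by simp [PySem.List.pySet?, h]
    rw [PySem.List.pySet?_eq_none_iff] at this
    exact absurd ⟨h1, h2⟩ this
  | some k =>
    refine ⟨xs.set k true, by simp [PySem.List.pySet?, h], by simp, countP_set_true_le xs k⟩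

theorem falseCount_pos_of_get_false (vis : List Bool) (i : Int)
    (hg : PySem.List.pyGet? vis i = some false) : 1 ≤ falseCount vis := by
  have hm : false ∈ vis := PySem.List.mem_of_pyGet?_eq_some vis hg
  have : 0 < vis.countP (fun b => !b) := by
    rw [List.countP_pos_iff]; exact ⟨false, hm, rfl⟩
  unfold falseCount; omega

-- sufficiency of the fuel for A's port: under the well-formedness part of Pre_, the loop
-- never runs out of fuel, the length of `visited` is preserved and `falseCount` never grows.
theorem suffL (y : Int) (rel : List (List Int)) : ∀ (fuel : Nat) (row : List Int) (vis : List Bool) (count : Int),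
    rel.length = vis.length →
    (∀ l ∈ rel, ∀ e ∈ l, -(vis.length : Int) ≤ e ∧ e < (vis.length : Int)) →
    (∀ e ∈ row, -(vis.length : Int) ≤ e ∧ e < (vis.length : Int)) →
    falseCount vis ≤ fuel →
    ∃ r vis', loopA fuel row y rel vis count = some (r, vis') ∧
      vis'.length = vis.length ∧ falseCount vis' ≤ falseCount vis := by
  intro fuel
  induction fuel using Nat.strong_induction_on with
  | _ fuel IH =>
    intro row
    induction row with
    | nil => intro vis count _ _ _ _; exact ⟨-1, vis, by simp [loopA], rfl, le_refl _⟩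
    | cons i rest IHr =>
      intro vis count hlen hwf hrow hfc
      obtain ⟨hi1, hi2⟩ := hrow i (List.mem_cons_self ..)
      obtain ⟨b, hg, -⟩ := pyGet?_some_of_range vis i hi1 hi2
      cases b with
      | true =>
        obtain ⟨r, vis', h1, h2, h3⟩ := IHr vis count hlen hwf
          (fun e he => hrow e (List.mem_cons_of_mem _ he)) hfc
        exact ⟨r, vis', by simp [loopA, hg, h1], h2, h3⟩
      | false =>
        by_cases hy : i = y
        · subst hy
          exact ⟨count + 1, vis, by simp [loopA, hg], rfl, le_refl _⟩
        · have hpos := falseCount_pos_of_get_false vis i hg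
          cases fuel with
          | zero => omega
          | succ f =>
            obtain ⟨vism, hset, hlenm, -⟩ := pySet?_some_of_range vis i hi1 hi2
            have hfcm : falseCount vism < falseCount vis := falseCount_pySet?_lt vis vism i hg hset
            obtain ⟨rowi, hgr, hmem⟩ := pyGet?_some_of_range rel i (by omega) (by omega)
            obtain ⟨r1, vis1, hloop1, hlen1, hfc1⟩ := IH f (by omega) rowi vism (count + 1)
              (by omega) (by rw [hlenm]; exact hwf)
              (by rw [hlenm]; exact hwf rowi hmem) (by omega)
            have hdfs : dfsA (f + 1) i y rel vis (count + 1) = some (r1, vis1) := by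
              simp [dfsA, hset, hgr, hloop1]
            by_cases hr1 : r1 = -1
            · obtain ⟨r, vis', h1, h2, h3⟩ := IHr vis1 count (by omega)
                (by rw [hlen1, hlenm]; exact hwf)
                (by rw [hlen1, hlenm]; exact fun e he => hrow e (List.mem_cons_of_mem _ he))
                (by omega)
              refine ⟨r, vis', ?_, by omega, by omega⟩
              simp [loopA, hg, hy, hdfs, hr1, h1]
            · refine ⟨r1, vis1, ?_, by omega, by omega⟩
              simp [loopA, hg, hy, hdfs, hr1]

-- branch equations for stepB (its named-match compilation resists direct rewriting)
theorem stepB_nil (y : Int) (rel : List (List Int)) (vis : List Bool) :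
    stepB [] y rel vis = some (-1) := by rw [stepB]

theorem stepB_pop (node : Int) (d : Int) (s : List (Int × List Int × Int)) (y : Int) (rel : List (List Int)) (vis : List Bool) :
    stepB ((node, [], d) :: s) y rel vis = stepB s y rel vis := by rw [stepB]

theorem stepB_visited (node i : Int) (it' : List Int) (d : Int) (s : List (Int × List Int × Int)) (y : Int) (rel : List (List Int)) (vis : List Bool)
    (hg : PySem.List.pyGet? vis i = some true) :
    stepB ((node, i :: it', d) :: s) y rel vis = stepB ((node, it', d) :: s) y rel vis := by
  rw [stepB]
  split <;> simp_all

theorem stepB_found (node i : Int) (it' : List Int) (d : Int) (s : List (Int × List Int × Int)) (y : Int) (rel : List (List Int)) (vis : List Bool)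
    (hg : PySem.List.pyGet? vis i = some false) (hy : i = y) :
    stepB ((node, i :: it', d) :: s) y rel vis = some (d + 1) := by
  rw [stepB]
  split <;> simp_all

theorem stepB_push (node i : Int) (it' : List Int) (d : Int) (s : List (Int × List Int × Int)) (y : Int) (rel : List (List Int)) (vis vis2 : List Bool) (row : List Int)
    (hg : PySem.List.pyGet? vis i = some false) (hy : ¬ i = y)
    (hs : PySem.List.pySet? vis i true = some vis2) (hr : PySem.List.pyGet? rel i = some row) :
    stepB ((node, i :: it', d) :: s) y rel vis = stepB ((i, row, d + 1) :: (node, it', d) :: s) y rel vis2 := by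
  rw [stepB]
  split
  · simp_all
  · simp_all
  · rw [if_neg hy]
    split <;> simp_all

-- the simulation: one run of A's neighbor loop corresponds to B's machine working through the
-- top frame; on success both report the same result, on failure B continues with the rest of
-- the stack and A's final `visited`.
theorem sim (y : Int) (rel : List (List Int)) : ∀ (fuel : Nat) (row : List Int) (vis : List Bool) (count : Int) (r : Int) (vis' : List Bool) (node : Int) (s : List (Int × List Int × Int)),
    -1 ≤ count →
    loopA fuel row y rel vis count = some (r, vis') →
    stepB ((node, row, count) :: s) y rel vis = (if r = -1 then stepB s y rel vis' else some r) := by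
  intro fuel
  induction fuel using Nat.strong_induction_on with
  | _ fuel IH =>
    intro row
    induction row with
    | nil =>
      intro vis count r vis' node s _ hl
      simp [loopA] at hl
      obtain ⟨rfl, rfl⟩ := hl
      rw [stepB_pop]
      simp
    | cons i rest IHr =>
      intro vis count r vis' node s hc hl
      rw [loopA] at hl
      cases hg : PySem.List.pyGet? vis i with
      | none => simp [hg] at hl
      | some b =>
        simp only [hg] at hl
        cases b with
        | true =>
          rw [stepB_visited _ _ _ _ _ _ _ _ hg]
          exact IHr vis count r vis' node s hc hl
        | false =>
          by_cases hy : i = y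
          · rw [if_pos hy] at hl
            obtain ⟨rfl, rfl⟩ : count + 1 = r ∧ vis = vis' := by simpa using hl
            rw [stepB_found _ _ _ _ _ _ _ _ hg hy]
            have : ¬ (count + 1 = -1) := by omega
            rw [if_neg this]
          · rw [if_neg hy] at hl
            cases hd : dfsA fuel i y rel vis (count + 1) with
            | none => simp [hd] at hl
            | some p =>
              obtain ⟨r1, vis1⟩ := p
              simp only [hd] at hl
              cases fuel with
              | zero => simp [dfsA] at hd
              | succ f =>
                rw [dfsA] at hd
                cases hset : PySem.List.pySet? vis i true with
                | none => simp [hset] at hd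
                | some vism =>
                  simp only [hset] at hd
                  cases hgr : PySem.List.pyGet? rel i with
                  | none => simp [hgr] at hd
                  | some rowi =>
                    simp only [hgr] at hd
                    rw [stepB_push _ _ _ _ _ _ _ _ _ _ hg hy hset hgr]
                    have hstep := IH f (by omega) rowi vism (count + 1) r1 vis1 i
                      ((node, rest, count) :: s) (by omega) hd
                    rw [hstep]
                    by_cases hr1 : r1 = -1
                    · rw [if_pos hr1]
                      have hcnd : ¬ (r1 ≠ -1) := by simp [hr1]
                      rw [if_neg hcnd] at hl
                      exact IHr vis1 count r vis' node s hc hl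
                    · rw [if_neg hr1]
                      rw [if_pos hr1] at hl
                      obtain ⟨rfl, rfl⟩ : r1 = r ∧ vis1 = vis' := by simpa using hl
                      simp [hr1]

-- ===== VERDICT (by name: the statement is the Claim_ definition above) =====
theorem dfs_spec : Claim_equal_dfs := by
  intro x y rel vis count _ hpre
  obtain ⟨hlen, ⟨hx1, hx2⟩, hwf, hcount⟩ := hpre
  unfold Spec_dfs
  obtain ⟨vis1, hset, hlen1, -⟩ := pySet?_some_of_range vis x hx1 hx2
  obtain ⟨row, hget, hmem⟩ := pyGet?_some_of_range rel x (by omega) (by omega)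
  have hfc : falseCount vis1 ≤ vis.length + 1 := by
    have := List.countP_le_length (p := fun b => !b) (l := vis1)
    unfold falseCount; omega
  obtain ⟨r, vis', hloop, -, -⟩ := suffL y rel (vis.length + 1) row vis1 count
    (by omega) (by rw [hlen1]; exact hwf) (by rw [hlen1]; exact hwf row hmem) hfc
  have hA : dfs x y rel vis count = r := by
    unfold dfs
    rw [show vis.length + 2 = (vis.length + 1) + 1 from rfl]
    rw [dfsA]
    simp only [hset, hget, hloop]
  have hB : dfs_alt x y rel vis count = r := by
    unfold dfs_alt
    simp only [hset, hget]
    rw [sim y rel (vis.length + 1) row vis1 count r vis' x [] hcount hloop]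
    by_cases hr : r = -1
    · rw [if_pos hr, stepB_nil]
      simp [hr]
    · rw [if_neg hr]
      simp
  rw [hA, hB]
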